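-- pv_equiv track=rewrite | github.com/molcathy/Python_QR_Code | qr_matrix.py | add_timing_patterns
-- ===== SOURCE A (Python) =====
-- def add_timing_patterns(qr):
--     # have a variable to keep track of the previous colour and then to alternate the colour for the given columns
--     # there will be specific co-ordinates where either the x or y increases
--     # These last_colour variables keep track of each individual timing pattern
--     last_colour1 = 'W'
--     last_colour2 = 'W'
--     for i in range(len(qr)):
--         for j in range(len(qr[i])):
--             if i == 6 and j == 6:
--                 pass
--             elif (i == 6 or j == 6) and (qr[i][j] != 'B' and qr[i][j] != 'W'):
--                 # When i == 6 then then the timing pattern is being added horizontally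
--                 if i == 6:
--                     if last_colour1 == 'W':
--                         qr[i][j] = 'B'
--                         last_colour1 = 'B'
--                     elif last_colour1 == 'B':
--                         qr[i][j] = 'W'
--                         last_colour1 = 'W'
--                 # When j == 6 the timing pattern is being added vertically
--                 elif j == 6:
--                     if last_colour2 == 'W':
--                         qr[i][j] = 'B'
--                         last_colour2 = 'B'
--                     elif last_colour2 == 'B':
--                         qr[i][j] = 'W'
--                         last_colour2 = 'W'
--     return qr
-- ===== SOURCE B (Python) =====
-- def add_timing_patterns(qr):
--     # Touch only row 6 and column 6 (skipping cell (6,6)), mutating qr in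
--     # place like the original.
--     if len(qr) > 6:
--         row = qr[6]
--         colour = 'W'
--         for j in range(len(row)):
--             if j != 6 and row[j] != 'B' and row[j] != 'W':
--                 colour = 'B' if colour == 'W' else 'W'
--                 row[j] = colour
--     colour = 'W'
--     for i in range(len(qr)):
--         if i != 6 and len(qr[i]) > 6 and qr[i][6] != 'B' and qr[i][6] != 'W':
--             colour = 'B' if colour == 'W' else 'W'
--             qr[i][6] = colour
--     return qr
-- ===== Notes on version B (the rewrite author's own statement) =====
-- stated objective: alternative
-- what changed: Instead of scanning every cell of the whole matrix, B walks only row 6 and then column 6 directly (skipping cell (6,6)), keeping one alternating colour per pass.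
import Mathlib
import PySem

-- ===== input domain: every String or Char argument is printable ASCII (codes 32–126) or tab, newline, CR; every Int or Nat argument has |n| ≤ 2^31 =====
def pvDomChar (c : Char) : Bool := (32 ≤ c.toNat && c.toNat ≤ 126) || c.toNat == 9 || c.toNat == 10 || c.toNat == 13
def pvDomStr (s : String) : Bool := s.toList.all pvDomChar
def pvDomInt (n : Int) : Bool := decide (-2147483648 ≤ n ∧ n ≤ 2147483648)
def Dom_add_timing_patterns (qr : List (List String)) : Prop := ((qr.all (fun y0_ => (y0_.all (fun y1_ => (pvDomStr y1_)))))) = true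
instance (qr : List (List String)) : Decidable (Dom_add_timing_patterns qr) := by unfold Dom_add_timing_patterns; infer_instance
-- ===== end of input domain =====

-- B walks only row 6 and column 6 (one alternating colour per pass) instead of scanning
-- every cell; both Pythons mutate qr in place and return it — the theorems are about the
-- returned value.  All indices below come from `range`, so they are in bounds and
-- List.getD / List.set are exact for Python's qr[i][j] read and assignment.

-- ===== PORT A =====
-- state: (qr, last_colour1, last_colour2)
def pvAInner (i : Nat) (st : List (List String) × String × String) (j : Nat) :
    List (List String) × String × String :=
  match st with
  | (q, c1, c2) =>
    let cell := (q.getD i []).getD j ""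
    if i = 6 ∧ j = 6 then (q, c1, c2)
    else if (i = 6 ∨ j = 6) ∧ (cell ≠ "B" ∧ cell ≠ "W") then
      if i = 6 then
        if c1 = "W" then (q.set i ((q.getD i []).set j "B"), "B", c2)
        else if c1 = "B" then (q.set i ((q.getD i []).set j "W"), "W", c2)
        else (q, c1, c2)
      else if j = 6 then
        if c2 = "W" then (q.set i ((q.getD i []).set j "B"), c1, "B")
        else if c2 = "B" then (q.set i ((q.getD i []).set j "W"), c1, "W")
        else (q, c1, c2)
      else (q, c1, c2)
    else (q, c1, c2)

def pvAOuter (st : List (List String) × String × String) (i : Nat) :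
    List (List String) × String × String :=
  (List.range ((st.1.getD i []).length)).foldl (pvAInner i) st

def add_timing_patterns (qr : List (List String)) : List (List String) :=
  ((List.range qr.length).foldl pvAOuter (qr, "W", "W")).1

-- ===== PORT B =====
def pvBRow (st : List String × String) (j : Nat) : List String × String :=
  match st with
  | (row, c) =>
    if j ≠ 6 ∧ row.getD j "" ≠ "B" ∧ row.getD j "" ≠ "W" then
      let c' := if c = "W" then "B" else "W"
      (row.set j c', c')
    else (row, c)

def pvBCol (st : List (List String) × String) (i : Nat) : List (List String) × String :=
  match st with
  | (q, c) =>
    let row := q.getD i []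
    if i ≠ 6 ∧ 6 < row.length ∧ row.getD 6 "" ≠ "B" ∧ row.getD 6 "" ≠ "W" then
      let c' := if c = "W" then "B" else "W"
      (q.set i (row.set 6 c'), c')
    else (q, c)

def add_timing_patterns_alt (qr : List (List String)) : List (List String) :=
  let q1 :=
    if 6 < qr.length then
      let r := qr.getD 6 []
      qr.set 6 ((List.range r.length).foldl pvBRow (r, "W")).1
    else qr
  ((List.range q1.length).foldl pvBCol (q1, "W")).1

-- ===== PRECONDITION & SPEC =====
def Spec_add_timing_patterns (qr : List (List String)) (out : List (List String)) : Prop := out = add_timing_patterns_alt qr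
instance (qr : List (List String)) (out : List (List String)) : Decidable (Spec_add_timing_patterns qr out) := by unfold Spec_add_timing_patterns; infer_instance

-- ===== CLAIM (what is proved, stated in full; the proofs are below) =====
def Claim_equal_add_timing_patterns : Prop := ∀ (qr : List (List String)), Dom_add_timing_patterns qr → Spec_add_timing_patterns qr (add_timing_patterns qr)

-- ===== LEMMAS AND PROOFS =====

-- the two colour states only ever hold "W" or "B"
def pvWB (c : String) : Prop := c = "W" ∨ c = "B"

theorem pvGetD_set_ne {α : Type} (l : List α) (m n : Nat) (h : m ≠ n) (a d : α) :
    (l.set m a).getD n d = l.getD n d := by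
  simp [List.getD_eq_getElem?_getD, List.getElem?_set_ne h]

theorem pvGetD_set_self {α : Type} (l : List α) (n : Nat) (h : n < l.length) (a d : α) :
    (l.set n a).getD n d = a := by
  simp [List.getD_eq_getElem?_getD, h]

theorem pvSet_getD_self {α : Type} (l : List α) (n : Nat) (h : n < l.length) (d : α) :
    l.set n (l.getD n d) = l := by
  rw [List.getD_eq_getElem l d h]; exact List.set_getElem_self h

theorem pvBCol_len (st : List (List String) × String) (i : Nat) :
    (pvBCol st i).1.length = st.1.length := by
  obtain ⟨q, c⟩ := st
  simp only [pvBCol]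
  split <;> simp

theorem pvBCol_getD6 (st : List (List String) × String) (i : Nat) :
    (pvBCol st i).1.getD 6 [] = st.1.getD 6 [] := by
  obtain ⟨q, c⟩ := st
  simp only [pvBCol]
  split
  · next h => exact pvGetD_set_ne _ _ _ h.1 _ _
  · rfl

theorem pvBCol_WB (st : List (List String) × String) (i : Nat) (h : pvWB st.2) :
    pvWB (pvBCol st i).2 := by
  obtain ⟨q, c⟩ := st
  simp only [pvBCol]
  split
  · by_cases hc : c = "W" <;> simp [pvWB, hc]
  · exact h

theorem pvColFold_len (L : List Nat) : ∀ (st : List (List String) × String),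
    (L.foldl pvBCol st).1.length = st.1.length := by
  induction L with
  | nil => intro st; rfl
  | cons a L ih => intro st; rw [List.foldl_cons, ih, pvBCol_len]

theorem pvColFold_getD6 (L : List Nat) : ∀ (st : List (List String) × String),
    (L.foldl pvBCol st).1.getD 6 [] = st.1.getD 6 [] := by
  induction L with
  | nil => intro st; rfl
  | cons a L ih => intro st; rw [List.foldl_cons, ih, pvBCol_getD6]

theorem pvColFold_WB (L : List Nat) : ∀ (st : List (List String) × String), pvWB st.2 →
    pvWB (L.foldl pvBCol st).2 := by
  induction L with
  | nil => intro st h; exact h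
  | cons a L ih => intro st h; exact ih _ (pvBCol_WB _ _ h)

-- a column step commutes with overwriting row 6
theorem pvBCol_set6 (q : List (List String)) (R : List String) (c : String) (i : Nat) :
    pvBCol (q.set 6 R, c) i = ((pvBCol (q, c) i).1.set 6 R, (pvBCol (q, c) i).2) := by
  by_cases hi : i = 6
  · subst hi
    simp [pvBCol]
  · have hrow : (q.set 6 R).getD i [] = q.getD i [] := pvGetD_set_ne _ _ _ (Ne.symm hi) _ _
    simp only [pvBCol, hrow]
    split
    · rw [List.set_comm _ _ (Ne.symm hi)]
    · rfl

theorem pvColFold_set6 (L : List Nat) : ∀ (q : List (List String)) (R : List String) (c : String),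
    L.foldl pvBCol (q.set 6 R, c)
      = ((L.foldl pvBCol (q, c)).1.set 6 R, (L.foldl pvBCol (q, c)).2) := by
  induction L with
  | nil => intro q R c; rfl
  | cons a L ih =>
    intro q R c
    rw [List.foldl_cons, List.foldl_cons, pvBCol_set6 q R c a]
    have := ih (pvBCol (q, c) a).1 R (pvBCol (q, c) a).2
    simpa using this

theorem pvBRow_WB (st : List String × String) (j : Nat) (h : pvWB st.2) :
    pvWB (pvBRow st j).2 := by
  obtain ⟨r, c⟩ := st
  simp only [pvBRow]
  split
  · by_cases hc : c = "W" <;> simp [pvWB, hc]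
  · exact h

-- the inner loop of A at i = 6 is B's row pass, lifted through `set 6`
theorem pvInner6_step (q : List (List String)) (r : List String) (c1 c2 : String) (j : Nat)
    (hq : 6 < q.length) (hc : pvWB c1) :
    pvAInner 6 (q.set 6 r, c1, c2) j
      = (q.set 6 (pvBRow (r, c1) j).1, (pvBRow (r, c1) j).2, c2) := by
  have hget : (q.set 6 r).getD 6 [] = r := pvGetD_set_self _ _ hq _ _
  by_cases hj : j = 6
  · subst hj; simp [pvAInner, pvBRow]
  · rcases hc with hc | hc <;> subst hc <;>
      · simp only [pvAInner, pvBRow, hget, hj]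
        split_ifs <;> simp_all [List.set_set]

theorem pvInner6_fold (L : List Nat) : ∀ (q : List (List String)) (r : List String) (c1 c2 : String),
    6 < q.length → pvWB c1 →
    L.foldl (pvAInner 6) (q.set 6 r, c1, c2)
      = (q.set 6 (L.foldl pvBRow (r, c1)).1, (L.foldl pvBRow (r, c1)).2, c2) := by
  induction L with
  | nil => intro q r c1 c2 _ _; rfl
  | cons a L ih =>
    intro q r c1 c2 hq hc
    rw [List.foldl_cons, List.foldl_cons, pvInner6_step q r c1 c2 a hq hc]
    have := ih q (pvBRow (r, c1) a).1 (pvBRow (r, c1) a).2 c2 hq (pvBRow_WB _ _ hc)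
    simpa using this

-- A's inner loop at i ≠ 6 is the identity away from j = 6 …
theorem pvAInner_id (i : Nat) (st : List (List String) × String × String) (j : Nat)
    (hi : i ≠ 6) (hj : j ≠ 6) : pvAInner i st j = st := by
  obtain ⟨q, c1, c2⟩ := st
  simp [pvAInner, hi, hj]

theorem pvFoldl_range_six {α : Type} (f : α → Nat → α) (h : ∀ s j, j ≠ 6 → f s j = s) :
    ∀ (m : Nat) (st : α), (List.range m).foldl f st = if 6 < m then f st 6 else st := by
  intro m
  induction m with
  | zero => intro st; simp
  | succ m ih =>
    intro st
    rw [List.range_succ, List.foldl_append, ih st]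
    simp only [List.foldl_cons, List.foldl_nil]
    by_cases hm : m = 6
    · subst hm; simp
    · rw [h _ m hm]
      by_cases h6 : 6 < m
      · rw [if_pos h6, if_pos (by omega)]
      · rw [if_neg h6, if_neg (by omega)]

-- … hence it collapses to a single column step
theorem pvAOuter_ne6 (q : List (List String)) (c1 c2 : String) (i : Nat)
    (hi : i ≠ 6) (hc : pvWB c2) :
    pvAOuter (q, c1, c2) i = ((pvBCol (q, c2) i).1, c1, (pvBCol (q, c2) i).2) := by
  unfold pvAOuter
  rw [pvFoldl_range_six (pvAInner i) (fun s j hj => pvAInner_id i s j hi hj)]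
  rcases hc with hc | hc <;> subst hc <;>
    · simp only [pvAInner, pvBCol]
      split_ifs <;> simp_all <;> omega

-- A's outer step at i = 6 is B's whole row pass
theorem pvAOuter_6 (q : List (List String)) (c1 c2 : String) (hq : 6 < q.length) (hc : pvWB c1) :
    pvAOuter (q, c1, c2) 6
      = (q.set 6 ((List.range (q.getD 6 []).length).foldl pvBRow (q.getD 6 [], c1)).1,
          ((List.range (q.getD 6 []).length).foldl pvBRow (q.getD 6 [], c1)).2, c2) := by
  unfold pvAOuter
  have hself : q = q.set 6 (q.getD 6 []) := (pvSet_getD_self q 6 hq []).symm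
  conv_lhs => rw [show ((((q, c1, c2) : List (List String) × String × String)).1.getD 6 []) = q.getD 6 [] from rfl]
  conv_lhs => rw [show ((q, c1, c2) : List (List String) × String × String) = (q.set 6 (q.getD 6 []), c1, c2) from by rw [← hself]]
  rw [pvInner6_fold _ q (q.getD 6 []) c1 c2 hq hc]

-- a run of A's outer steps that never hits i = 6 is B's column pass
theorem pvFold_ne6 (L : List Nat) : ∀ (q : List (List String)) (c1 c2 : String),
    (∀ i ∈ L, i ≠ 6) → pvWB c2 →
    L.foldl pvAOuter (q, c1, c2)
      = ((L.foldl pvBCol (q, c2)).1, c1, (L.foldl pvBCol (q, c2)).2) := by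
  induction L with
  | nil => intro q c1 c2 _ _; rfl
  | cons a L ih =>
    intro q c1 c2 hL hc
    rw [List.foldl_cons, List.foldl_cons,
        pvAOuter_ne6 q c1 c2 a (hL a (List.mem_cons_self)) hc]
    have := ih (pvBCol (q, c2) a).1 c1 (pvBCol (q, c2) a).2
      (fun i hi => hL i (List.mem_cons_of_mem _ hi)) (pvBCol_WB _ _ hc)
    simpa using this

-- ===== VERDICT (by name: the statement is the Claim_ definition above) =====
theorem add_timing_patterns_spec : Claim_equal_add_timing_patterns := by
  intro qr _
  unfold Spec_add_timing_patterns add_timing_patterns add_timing_patterns_alt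
  by_cases hn : 6 < qr.length
  · -- split range n = range' 0 6 ++ 6 :: range' 7 (n - 7)
    have hsplit : List.range qr.length
        = List.range' 0 6 ++ (6 :: List.range' 7 (qr.length - 7)) := by
      rw [List.range_eq_range']
      rw [show (6 : Nat) :: List.range' 7 (qr.length - 7) = List.range' 6 ((qr.length - 7) + 1) from
        by simp [List.range'_succ]]
      rw [show List.range' 0 6 ++ List.range' 6 (qr.length - 7 + 1)
            = List.range' 0 (6 + (qr.length - 7 + 1)) from by simpa using (List.range'_append : List.range' 0 6 1 ++ _ = _)]
      congr 1
      omega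
    have hP : ∀ i ∈ List.range' 0 6, i ≠ 6 := by
      intro i hi
      have := List.mem_range'_1.mp hi
      omega
    have hT : ∀ i ∈ List.range' 7 (qr.length - 7), i ≠ 6 := by
      intro i hi
      have := List.mem_range'_1.mp hi
      omega
    set P := List.range' 0 6 with hPdef
    set T := List.range' 7 (qr.length - 7) with hTdef
    -- A side
    rw [hsplit, List.foldl_append, List.foldl_cons]
    rw [pvFold_ne6 P qr "W" "W" hP (Or.inl rfl)]
    set qP := (P.foldl pvBCol (qr, "W")).1 with hqP
    set cP := (P.foldl pvBCol (qr, "W")).2 with hcP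
    have hqPlen : 6 < qP.length := by rw [hqP, pvColFold_len]; exact hn
    have hqPget : qP.getD 6 [] = qr.getD 6 [] := by rw [hqP, pvColFold_getD6]
    have hcPWB : pvWB cP := pvColFold_WB P _ (Or.inl rfl)
    rw [pvAOuter_6 qP "W" cP hqPlen (Or.inl rfl)]
    set R := ((List.range (qr.getD 6 []).length).foldl pvBRow (qr.getD 6 [], "W")).1 with hR
    set c1' := ((List.range (qr.getD 6 []).length).foldl pvBRow (qr.getD 6 [], "W")).2 with hc1'
    rw [show ((List.range (qP.getD 6 []).length).foldl pvBRow (qP.getD 6 [], "W")).1 = R from by rw [hqPget, hR]]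
    rw [show ((List.range (qP.getD 6 []).length).foldl pvBRow (qP.getD 6 [], "W")).2 = c1' from by rw [hqPget, hc1']]
    rw [pvFold_ne6 T (qP.set 6 R) c1' cP hT hcPWB]
    rw [pvColFold_set6 T qP R cP]
    -- B side
    rw [if_pos hn]
    simp only
    rw [show (qr.set 6 ((List.range (qr.getD 6 []).length).foldl pvBRow (qr.getD 6 [], "W")).1)
          = qr.set 6 R from by rw [hR]]
    rw [List.length_set, hsplit, List.foldl_append, List.foldl_cons]
    rw [pvColFold_set6 P qr R "W"]
    rw [show ((((P.foldl pvBCol (qr, "W")).1.set 6 R, (P.foldl pvBCol (qr, "W")).2)) : List (List String) × String)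
          = (qP.set 6 R, cP) from by rw [hqP, hcP]]
    rw [show pvBCol (qP.set 6 R, cP) 6 = (qP.set 6 R, cP) from by simp [pvBCol]]
    rw [pvColFold_set6 T qP R cP]
  · -- n ≤ 6: row 6 never exists, only the column pass runs
    have hP : ∀ i ∈ List.range qr.length, i ≠ 6 := by
      intro i hi
      have := List.mem_range.mp hi
      omega
    rw [if_neg hn, pvFold_ne6 (List.range qr.length) qr "W" "W" hP (Or.inl rfl)]
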